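-- pv_equiv track=rewrite | github.com/kimeloo/BaekJoon | 백준/Silver/1541. 잃어버린 괄호/잃어버린 괄호.py | append_parentheses
-- ===== SOURCE A (Python) =====
-- def append_parentheses(expression:list):
--     expression.insert(0, "(")
--     minus_index = []
--     for idx, num in enumerate(expression):
--         if num=="-":
--             minus_index.append(idx)
--     minus_index.reverse()
--     for idx in minus_index:
--         expression.insert(idx+1, "(")
--         expression.insert(idx, ")")
--     expression.append(")")
--     return expression
-- ===== SOURCE B (Python) =====
-- def append_parentheses(expression: list):
--     # Partition on "-" then reassemble: "(" seg ")" joined by "-"; same in-place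
--     # mutation and return value as the original.
--     segments = []
--     current = []
--     for tok in expression:
--         if tok == "-":
--             segments.append(current)
--             current = []
--         else:
--             current.append(tok)
--     segments.append(current)
--     result = ["("] + segments[0] + [")"]
--     for seg in segments[1:]:
--         result += ["-", "("] + seg + [")"]
--     expression[:] = result
--     return expression
-- ===== Notes on version B (the rewrite author's own statement) =====
-- stated objective: alternative
-- what changed: B partitions the token list into segments split on '-' in one forward pass and reassembles '(' seg ')' joined by bare '-', instead of A's insert-at-front, collect-minus-indices, then reversed index-by-index list.insert pass; B keeps the same in-place mutation and return value.
import Mathlib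
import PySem

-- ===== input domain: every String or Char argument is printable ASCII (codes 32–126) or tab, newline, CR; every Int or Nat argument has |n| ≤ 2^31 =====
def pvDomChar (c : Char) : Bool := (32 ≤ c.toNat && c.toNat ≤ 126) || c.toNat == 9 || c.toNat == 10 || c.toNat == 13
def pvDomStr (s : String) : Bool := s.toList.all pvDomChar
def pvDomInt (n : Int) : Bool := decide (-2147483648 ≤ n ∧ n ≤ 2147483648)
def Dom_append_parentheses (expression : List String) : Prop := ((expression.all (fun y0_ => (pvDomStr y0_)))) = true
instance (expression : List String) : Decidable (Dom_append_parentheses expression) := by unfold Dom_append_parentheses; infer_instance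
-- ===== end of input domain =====

-- B partitions the tokens on "-" and reassembles "(" seg ")" joined by "-", instead of
-- A's locate-minuses-and-insert pass; Python A and B both mutate the argument in place
-- and return it, the equivalence proved here is about the returned list of tokens.

-- ===== PORT A =====
def append_parentheses (expression : List String) : List String :=
  let e1 := PySem.List.insert expression 0 "("
  let minus_index : List Int := (PySem.List.enumerate e1).foldl
      (fun acc p => if p.2 = "-" then acc ++ [p.1] else acc) []
  let minus_rev := minus_index.reverse
  let e2 := minus_rev.foldl (fun acc idx =>
      PySem.List.insert (PySem.List.insert acc (idx + 1) "(") idx ")") e1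
  e2 ++ [")"]

-- ===== PORT B =====
def append_parentheses_alt (expression : List String) : List String :=
  let st := expression.foldl
      (fun (p : List (List String) × List String) tok =>
        if tok = "-" then (p.1 ++ [p.2], []) else (p.1, p.2 ++ [tok]))
      ([], [])
  let segments := st.1 ++ [st.2]
  -- segments is never empty, so Python's segments[0] never raises; headI is exact here
  let result := ["("] ++ segments.headI ++ [")"]
  (segments.drop 1).foldl (fun acc seg => acc ++ (["-", "("] ++ seg ++ [")"])) result

-- ===== PRECONDITION & SPEC =====
def Spec_append_parentheses (expression : List String) (out : List String) : Prop := out = append_parentheses_alt expression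
instance (expression : List String) (out : List String) : Decidable (Spec_append_parentheses expression out) := by unfold Spec_append_parentheses; infer_instance

-- ===== CLAIM (what is proved, stated in full; the proofs are below) =====
def Claim_equal_append_parentheses : Prop := ∀ (expression : List String), Dom_append_parentheses expression → Spec_append_parentheses expression (append_parentheses expression)

-- ===== LEMMAS AND PROOFS =====

-- the common normal form: each "-" becomes ")" "-" "(", wrapped in an outer pair
def pvExpand (l : List String) : List String :=
  l.flatMap (fun s => if s = "-" then [")", "-", "("] else [s])

-- positions (as Nats) of "-" in a list, front to back
def pvMidx : List String → List Nat
  | [] => []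
  | x :: xs => (if x = "-" then [0] else []) ++ (pvMidx xs).map (· + 1)

-- A's per-minus insertion step
def pvIns (idx : Int) (acc : List String) : List String :=
  PySem.List.insert (PySem.List.insert acc (idx + 1) "(") idx ")"

theorem pv_ins_big (n : Nat) (xs : List String) (v : String) (h : xs.length ≤ n) :
    PySem.List.insert xs (n : Int) v = xs ++ [v] := by
  simp only [PySem.List.insert, PySem.List.sliceIndices]
  norm_num
  rw [show (if (n:Int) < 0 then max ((n:Int) + ↑xs.length) 0 else min (n:Int) ↑xs.length) = (xs.length:Int) from by
    rw [if_neg (by omega)]; omega]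
  simp

theorem pv_ins_succ_cons (n : Nat) (x v : String) (t : List String) :
    PySem.List.insert (x :: t) ((n : Int) + 1) v = x :: PySem.List.insert t (n : Int) v := by
  by_cases h : n ≤ t.length
  · rw [show ((n:Int)+1) = (((n+1:Nat)):Int) by push_cast; ring]
    rw [PySem.List.insert_natCast _ _ _ (by simpa using Nat.succ_le_succ h),
        PySem.List.insert_natCast _ _ _ h]
    simp
  · rw [show ((n:Int)+1) = (((n+1:Nat)):Int) by push_cast; ring]
    rw [pv_ins_big _ _ _ (by simp; omega), pv_ins_big _ _ _ (by omega)]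
    simp

-- the index-collecting loop of A computes pvMidx (shifted by the enumerate start)
theorem pv_collect (l : List String) : ∀ (s : Int) (acc : List Int),
    (PySem.List.enumerate l s).foldl
        (fun acc p => if p.2 = "-" then acc ++ [p.1] else acc) acc
      = acc ++ (pvMidx l).map (fun (n : Nat) => s + (n : Int)) := by
  induction l with
  | nil => intro s acc; simp [PySem.List.enumerate, pvMidx]
  | cons x xs ih =>
    intro s acc
    rw [PySem.List.enumerate_cons, List.foldl_cons, ih (s + 1)]
    by_cases hx : x = "-"
    · simp only [pvMidx, hx]
      simp [List.append_assoc]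
      intro a _; ring
    · simp only [pvMidx, hx]
      simp
      intro a _; ring

theorem pv_ins_shift (n : Nat) (x : String) (t : List String) :
    pvIns ((n : Int) + 1) (x :: t) = x :: pvIns (n : Int) t := by
  simp only [pvIns]
  rw [show ((n:Int)+1+1) = (((n+1:Nat)):Int) + 1 by push_cast; ring, pv_ins_succ_cons,
      show (((n+1:Nat)):Int) = (n:Int) + 1 by push_cast; ring, pv_ins_succ_cons]

theorem pv_foldr_shift (m : List Nat) (x : String) (l : List String) :
    List.foldr (fun (n : Nat) acc => pvIns ((n : Int) + 1) acc) (x :: l) m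
      = x :: List.foldr (fun (n : Nat) acc => pvIns (n : Int) acc) l m := by
  induction m with
  | nil => rfl
  | cons n m ih => simp only [List.foldr_cons, ih, pv_ins_shift]

-- the insertion loop of A, run over the minus positions back to front, expands every "-"
theorem pv_foldr_ins (l : List String) :
    List.foldr (fun (n : Nat) acc => pvIns (n : Int) acc) l (pvMidx l) = pvExpand l := by
  induction l with
  | nil => rfl
  | cons x xs ih =>
    by_cases hx : x = "-"
    · subst hx
      have hm : pvMidx ("-" :: xs) = 0 :: (pvMidx xs).map (· + 1) := by simp [pvMidx]
      rw [hm, List.foldr_cons, List.foldr_map]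
      simp only [Nat.cast_add, Nat.cast_one]
      rw [pv_foldr_shift, ih]
      show pvIns ((0 : Nat) : Int) ("-" :: pvExpand xs) = pvExpand ("-" :: xs)
      simp only [pvIns, Nat.cast_zero]
      rw [show (0 : Int) + 1 = ((0 : Nat) : Int) + 1 by norm_num,
          pv_ins_succ_cons, Nat.cast_zero, PySem.List.insert_zero, PySem.List.insert_zero]
      simp [pvExpand]
    · have hm : pvMidx (x :: xs) = (pvMidx xs).map (· + 1) := by simp [pvMidx, hx]
      rw [hm, List.foldr_map]
      simp only [Nat.cast_add, Nat.cast_one]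
      rw [pv_foldr_shift, ih]
      simp [pvExpand, hx]

-- A's result is the normal form
theorem pv_a_eq (e : List String) :
    append_parentheses e = "(" :: pvExpand e ++ [")"] := by
  unfold append_parentheses
  dsimp only
  rw [PySem.List.insert_zero]
  rw [pv_collect ("(" :: e) 0 []]
  simp only [List.nil_append, List.foldl_reverse, zero_add]
  rw [List.foldr_map]
  show List.foldr (fun (n : Nat) acc => pvIns (n : Int) acc) ("(" :: e) (pvMidx ("(" :: e)) ++ [")"]
      = "(" :: pvExpand e ++ [")"]
  rw [pv_foldr_ins]
  simp [pvExpand]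

-- B's split, as a recursive function: (first segment, remaining segments)
def pvSplit : List String → List String × List (List String)
  | [] => ([], [])
  | x :: xs =>
      let p := pvSplit xs
      if x = "-" then ([], p.1 :: p.2) else (x :: p.1, p.2)

-- B's accumulating fold flushes to pvSplit
theorem pv_flush (e : List String) : ∀ (segs : List (List String)) (cur : List String),
    (e.foldl (fun (p : List (List String) × List String) tok =>
        if tok = "-" then (p.1 ++ [p.2], []) else (p.1, p.2 ++ [tok])) (segs, cur)).1
      ++ [(e.foldl (fun (p : List (List String) × List String) tok =>
        if tok = "-" then (p.1 ++ [p.2], []) else (p.1, p.2 ++ [tok])) (segs, cur)).2]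
    = segs ++ ((cur ++ (pvSplit e).1) :: (pvSplit e).2) := by
  induction e with
  | nil => intro segs cur; simp [pvSplit]
  | cons x xs ih =>
    intro segs cur
    by_cases hx : x = "-"
    · simp only [List.foldl_cons, hx, ih, pvSplit]
      simp
    · simp only [List.foldl_cons, hx, ih, pvSplit]
      simp [List.append_assoc]

-- assembling the split segments yields the normal form
theorem pv_join (e : List String) :
    ["("] ++ (pvSplit e).1 ++ [")"]
        ++ ((pvSplit e).2).flatMap (fun seg => ["-", "("] ++ seg ++ [")"])
      = "(" :: pvExpand e ++ [")"] := by
  induction e with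
  | nil => rfl
  | cons x xs ih =>
    by_cases hx : x = "-"
    · simp only [pvSplit, hx]
      have ih' : (pvSplit xs).1 ++ [")"]
          ++ ((pvSplit xs).2).flatMap (fun seg => ["-", "("] ++ seg ++ [")"])
          = pvExpand xs ++ [")"] := by
        have := ih
        simpa [List.append_assoc] using this
      simp only [pvExpand, List.flatMap_cons] at ih' ⊢
      simp [List.append_assoc] at ih' ⊢
      simp [ih']
    · simp only [pvSplit, if_neg hx]
      have ih' : (pvSplit xs).1 ++ [")"]
          ++ ((pvSplit xs).2).flatMap (fun seg => ["-", "("] ++ seg ++ [")"])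
          = pvExpand xs ++ [")"] := by
        have := ih
        simpa [List.append_assoc] using this
      simp only [pvExpand, List.flatMap_cons, if_neg hx] at ih' ⊢
      simp [List.append_assoc] at ih' ⊢
      simp [ih']

-- B's result is the normal form
theorem pv_b_eq (e : List String) :
    append_parentheses_alt e = "(" :: pvExpand e ++ [")"] := by
  unfold append_parentheses_alt
  simp only
  have hfl := pv_flush e [] []
  -- identify segments with pvSplit
  rw [PySem.List.foldl_append_eq_flatMap]
  have hseg : (e.foldl (fun (p : List (List String) × List String) tok =>
        if tok = "-" then (p.1 ++ [p.2], []) else (p.1, p.2 ++ [tok])) ([], [])).1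
      ++ [(e.foldl (fun (p : List (List String) × List String) tok =>
        if tok = "-" then (p.1 ++ [p.2], []) else (p.1, p.2 ++ [tok])) ([], [])).2]
      = (pvSplit e).1 :: (pvSplit e).2 := by simpa using hfl
  rw [hseg]
  simpa [List.append_assoc] using pv_join e

-- ===== VERDICT (by name: the statement is the Claim_ definition above) =====
theorem append_parentheses_spec : Claim_equal_append_parentheses := by
  intro e _
  show append_parentheses e = append_parentheses_alt e
  rw [pv_a_eq, pv_b_eq]
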